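-- pv_equiv track=rewrite | github.com/c-sky/toolchain-build | lib/Version.py | convert_version_to_str
-- ===== SOURCE A (Python) =====
-- def convert_version_to_str(version, n=3):
--     assert n > 0
--     vn = []
--     for i in reversed(range(n)):
--         cn = version >> (8 * i)
--         version -= cn << (8 * i)
--         vn.append(str(cn))
--     return ".".join(vn)
-- ===== SOURCE B (Python) =====
-- def convert_version_to_str(version, n=3):
--     parts = []
--     for _ in range(n - 1):
--         version, r = divmod(version, 256)
--         parts.append(str(r))
--     parts.append(str(version))
--     return ".".join(reversed(parts))
-- ===== Notes on version B (the rewrite author's own statement) =====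
-- stated objective: alternative
-- what changed: B splits the version from the least-significant end with n-1 divmod(…,256) steps collecting remainders low-to-high and joins the reversed list, instead of A's high-to-low shift-and-subtract loop.
import Mathlib
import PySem

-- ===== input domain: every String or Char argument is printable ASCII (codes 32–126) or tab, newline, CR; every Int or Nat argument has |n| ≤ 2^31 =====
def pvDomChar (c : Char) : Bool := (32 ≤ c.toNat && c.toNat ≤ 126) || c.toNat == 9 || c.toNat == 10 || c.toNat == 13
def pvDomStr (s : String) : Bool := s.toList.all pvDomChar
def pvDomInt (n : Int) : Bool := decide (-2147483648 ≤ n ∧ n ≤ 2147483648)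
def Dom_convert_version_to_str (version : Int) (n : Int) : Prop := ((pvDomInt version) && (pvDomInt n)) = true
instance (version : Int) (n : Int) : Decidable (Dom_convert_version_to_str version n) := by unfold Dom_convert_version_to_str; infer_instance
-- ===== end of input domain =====

-- B builds the components low-to-high with divmod and reverses at the end, instead of A's
-- high-to-low shift-and-subtract; objective: alternative (same cost, different traversal).

-- ===== PORT A =====
-- Loop i = n-1 .. 0: cn = version >> 8i; version -= cn << 8i; append str(cn).
-- Shift amounts 8*i are always ≥ 0 here (i ∈ range n), so (8*i).toNat is exact.
def convert_version_to_str (version : Int) (n : Int) : String :=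
  let st := ((PySem.List.pyRange 0 n 1).reverse).foldl
    (fun (st : Int × List String) (i : Int) =>
      let cn := st.1 >>> (8 * i).toNat
      (st.1 - (cn <<< (8 * i).toNat), st.2 ++ [PySem.Int.toStr cn]))
    (version, [])
  PySem.Str.join "." st.2

-- ===== PORT B =====
-- Loop n-1 times: version, r = divmod(version, 256) (divisor 256 ≠ 0, so floordiv/mod are
-- total here); append str(r); finally append str(version) and join the reversed list.
def convert_version_to_str_alt (version : Int) (n : Int) : String :=
  let st := (PySem.List.pyRange 0 (n - 1) 1).foldl
    (fun (st : Int × List String) (_ : Int) =>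
      (PySem.Int.floordiv st.1 256, st.2 ++ [PySem.Int.toStr (PySem.Int.mod st.1 256)]))
    (version, [])
  PySem.Str.join "." (st.2 ++ [PySem.Int.toStr st.1]).reverse

-- ===== PRECONDITION & SPEC =====
-- A's 'assert n > 0' raises AssertionError for n ≤ 0; exactly those inputs are excluded.
def Pre_convert_version_to_str (version : Int) (n : Int) : Prop := 0 < n
instance (version : Int) (n : Int) : Decidable (Pre_convert_version_to_str version n) := by
  unfold Pre_convert_version_to_str; infer_instance

def pvWitness_convert_version_to_str : Int × Int := (66051, 3)

def Spec_convert_version_to_str (version : Int) (n : Int) (out : String) : Prop :=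
  out = convert_version_to_str_alt version n
instance (version : Int) (n : Int) (out : String) : Decidable (Spec_convert_version_to_str version n out) := by
  unfold Spec_convert_version_to_str; infer_instance

-- ===== CLAIM (what is proved, stated in full; the proofs are below) =====
def Claim_equal_convert_version_to_str : Prop := ∀ (version : Int) (n : Int), Dom_convert_version_to_str version n → Pre_convert_version_to_str version n → Spec_convert_version_to_str version n (convert_version_to_str version n)

-- ===== LEMMAS AND PROOFS =====

-- A's components, i = m-1 down to 0 (A with n components runs this at m = n).
def aComps : Int → Nat → List Int
  | _, 0 => []
  | v, (m+1) =>
    (v >>> (8*m)) :: aComps (v - ((v >>> (8*m)) <<< (8*m))) m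

-- B's remainders r_0, r_1, … and the final quotient after m divmod steps.
def bComps : Int → Nat → List Int
  | _, 0 => []
  | v, (m+1) => PySem.Int.mod v 256 :: bComps (PySem.Int.floordiv v 256) m

def bFin : Int → Nat → Int
  | v, 0 => v
  | v, (m+1) => bFin (PySem.Int.floordiv v 256) m

theorem emod_mul_ediv (v b c : Int) (hb : 0 < b) : (v % (b*c)) / b = (v / b) % c := by
  rw [Int.emod_def, Int.emod_def, ← Int.ediv_ediv_of_nonneg hb.le]
  calc (v - b*c*(v/b/c))/b = (v + b * (-(c*(v/b/c))))/b := by ring_nf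
    _ = v/b + -(c*(v/b/c)) := Int.add_mul_ediv_left _ _ hb.ne'
    _ = v/b - c*(v/b/c) := by ring

theorem bFin_closed (m : Nat) (v : Int) : bFin v m = v / 256^m := by
  induction m generalizing v with
  | zero => simp [bFin]
  | succ m ih =>
    rw [bFin, ih, PySem.Int.floordiv_eq_ediv_of_pos (by norm_num)]
    rw [Int.ediv_ediv_of_nonneg (by norm_num)]
    ring_nf

theorem bComps_closed (m : Nat) (v : Int) :
    bComps v m = (List.range m).map (fun j => v / 256^j % 256) := by
  induction m generalizing v with
  | zero => simp [bComps]
  | succ m ih =>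
    rw [bComps, ih, List.range_succ_eq_map]
    rw [PySem.Int.mod_eq_emod_of_pos (by norm_num),
        PySem.Int.floordiv_eq_ediv_of_pos (by norm_num)]
    rw [List.map_cons, List.map_map]
    congr 1
    · norm_num
    · apply List.map_congr_left
      intro j _
      simp only [Function.comp_apply]
      rw [Int.ediv_ediv_of_nonneg (by norm_num), pow_succ]
      ring_nf

theorem aComps_closed (m : Nat) (v : Int) :
    aComps v (m+1) = v / 256^m :: (List.range m).reverse.map (fun j => v / 256^j % 256) := by
  induction m generalizing v with
  | zero => simp [aComps]
  | succ m ih =>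
    rw [aComps, Int.shiftRight_eq_div_pow, Int.shiftLeft_eq]
    have hpow : (2:Int) ^ (8 * (m+1)) = 256 ^ (m+1) := by
      rw [pow_mul]; norm_num
    have hpow' : ((2 ^ (8 * (m+1)) : Nat) : Int) = 256 ^ (m+1) := by
      push_cast; exact hpow
    rw [hpow', hpow]
    have hr : v - v / 256^(m+1) * 256^(m+1) = v % 256^(m+1) := by
      rw [Int.emod_def]; ring
    rw [hr, ih]
    have h256 : (0:Int) < 256 ^ m := by positivity
    congr 1
    rw [List.range_succ, List.reverse_append, List.reverse_singleton, List.singleton_append,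
        List.map_cons]
    congr 1
    · -- head: (v % 256^(m+1)) / 256^m = v / 256^m % 256
      have : (256:Int)^(m+1) = 256^m * 256 := by ring
      rw [this, emod_mul_ediv _ _ _ h256]
    · -- tail: components j < m are unchanged by taking v mod 256^(m+1)
      apply List.map_congr_left
      intro j hj
      rw [List.mem_reverse, List.mem_range] at hj
      have hsplit : (256:Int)^(m+1) = 256^j * 256^(m+1-j) := by
        rw [← pow_add]; congr 1; omega
      rw [hsplit, emod_mul_ediv _ _ _ (by positivity)]
      have hdvd : (256:Int) ∣ 256^(m+1-j) := dvd_pow_self 256 (by omega)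
      rw [Int.emod_emod_of_dvd _ hdvd]

-- A's fold accumulates exactly aComps.
theorem A_loop (m : Nat) (v : Int) (acc : List String) :
    (((PySem.List.pyRange 0 (m : Int) 1).reverse).foldl
      (fun (st : Int × List String) (i : Int) =>
        let cn := st.1 >>> (8 * i).toNat
        (st.1 - (cn <<< (8 * i).toNat), st.2 ++ [PySem.Int.toStr cn]))
      (v, acc)).2 = acc ++ (aComps v m).map PySem.Int.toStr := by
  induction m generalizing v acc with
  | zero =>
    rw [PySem.List.pyRange_one_eq_nil (by norm_num)]
    simp [aComps]
  | succ m ih =>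
    have hcast : ((m+1 : Nat) : Int) = (m : Int) + 1 := by push_cast; ring
    rw [hcast, PySem.List.pyRange_one_succ_right (by positivity),
        List.reverse_append, List.reverse_singleton, List.singleton_append, List.foldl_cons]
    have htn : (8 * (m : Int)).toNat = 8 * m := by omega
    simp only [htn]
    rw [ih]
    simp [aComps]

-- right-unfoldings for B's fold
theorem bComps_succ (m : Nat) (v : Int) :
    bComps v (m+1) = bComps v m ++ [PySem.Int.mod (bFin v m) 256] := by
  induction m generalizing v with
  | zero => simp [bComps, bFin]
  | succ m ih => rw [bComps, ih, bFin]; simp [bComps]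

theorem bFin_succ (m : Nat) (v : Int) :
    bFin v (m+1) = PySem.Int.floordiv (bFin v m) 256 := by
  induction m generalizing v with
  | zero => simp [bFin]
  | succ m ih => rw [bFin, ih]; rfl

theorem B_loop (m : Nat) (v : Int) (acc : List String) :
    ((PySem.List.pyRange 0 (m : Int) 1).foldl
      (fun (st : Int × List String) (_ : Int) =>
        (PySem.Int.floordiv st.1 256, st.2 ++ [PySem.Int.toStr (PySem.Int.mod st.1 256)]))
      (v, acc)) = (bFin v m, acc ++ (bComps v m).map PySem.Int.toStr) := by
  induction m with
  | zero =>
    rw [PySem.List.pyRange_one_eq_nil (by norm_num)]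
    simp [bComps, bFin]
  | succ m ih =>
    have hcast : ((m+1 : Nat) : Int) = (m : Int) + 1 := by push_cast; ring
    rw [hcast, PySem.List.pyRange_one_succ_right (by positivity), List.foldl_append, ih]
    simp [bComps_succ, bFin_succ]

-- the two component lists agree (A's list = final quotient, then B's remainders reversed)
theorem comps_eq (m : Nat) (v : Int) :
    aComps v (m+1) = bFin v m :: (bComps v m).reverse := by
  rw [aComps_closed, bFin_closed, bComps_closed, List.map_reverse]

-- ===== VERDICT (by name: the statement is the Claim_ definition above) =====
theorem convert_version_to_str_spec : Claim_equal_convert_version_to_str := by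
  unfold Claim_equal_convert_version_to_str
  intro version n _ hpre
  unfold Spec_convert_version_to_str convert_version_to_str convert_version_to_str_alt
  have hpos : 0 < n := hpre
  have hm : ∃ m : Nat, n = (m : Int) + 1 := ⟨(n - 1).toNat, by omega⟩
  obtain ⟨m, rfl⟩ := hm
  have h1 : ((m : Int) + 1) = ((m + 1 : Nat) : Int) := by push_cast; ring
  have h2 : ((m : Int) + 1) - 1 = (m : Int) := by ring
  rw [h2]
  simp only [h1, A_loop, B_loop]
  rw [comps_eq]
  simp [List.reverse_append, List.map_reverse]
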